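-- pv_equiv track=rewrite | github.com/shreyastalamakki/CSE_231_Projects | proj07.py | calc_similarity_scores
-- ===== SOURCE A (Python) =====
-- def num_in_common_between_lists(list1, list2):
--     ''' Gets two lists of the mutual friends. Creates a for loop and then a
--     a if statement to check if the same term is in both lists. Then an
--     initial variable is added onto everytime a mutual friend is found.'''
--     count = 0
--     for number in list1:
--         if number in list2: # nested ifs to check if the friend is in both list
--             count += 1 # increments the count.
--     return count
--
-- def init_matrix(n):
--     '''The parameter n is sent into the function.
--     Create an nxn matrix, initialize with zeros, and return the matrix.
--     Appends the 'n' number of lists.'''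
--     matrix = []
--     for row in range(n):  # for each of the n rows
--         matrix.append([])  # create the row and initialize as empty
--         #for column in range(n):
--             #matrix[row].append(0)  # append a 0 for each of the n columns
--     return matrix
--
-- def calc_similarity_scores(network):
--     '''The parameter network is sent into the function. A variable n is
--     assigned to be equal to the length of the network. A for loop and a
--     nested for loop is created to call the num_in_common function. The
--     number of mutual friends is appendeded into the similarity matrix. The
--     similarity matrix is returned by the function.'''
--     n = len(network) # finds the number of friends in the network.
--     similarity_matrix = init_matrix(n)
--     for i in range(n):
--         for j in range(n):
--             x = num_in_common_between_lists(network[i],network[j]) # calls the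
--             # num_in_common function and inputs the two parameters.
--             similarity_matrix[i].append(x) # appends the number of mutual
--             # friends into the list of the appropriate friend.
--
--     return similarity_matrix
-- ===== SOURCE B (Python) =====
-- def calc_similarity_scores(network):
--     # Precompute each row's distinct values (first-occurrence order) once,
--     # and for each row a multiplicity counter; entry (i,j) is then the sum
--     # of row i's counts over row j's distinct values.
--     distincts = [list(dict.fromkeys(row)) for row in network]
--     matrix = []
--     for row in network:
--         cnt = {}
--         for x in row:
--             cnt[x] = cnt.get(x, 0) + 1
--         matrix.append([sum(cnt.get(x, 0) for x in ds) for ds in distincts])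
--     return matrix
-- ===== Notes on version B (the rewrite author's own statement) =====
-- stated objective: faster
-- what changed: Instead of A's per-entry membership scan of network[j] for every element of network[i], B builds once per row a multiplicity counter (dict) and an ordered list of distinct values, and computes each entry as a sum of O(1) counter lookups over the other row's distinct values.
import Mathlib
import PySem

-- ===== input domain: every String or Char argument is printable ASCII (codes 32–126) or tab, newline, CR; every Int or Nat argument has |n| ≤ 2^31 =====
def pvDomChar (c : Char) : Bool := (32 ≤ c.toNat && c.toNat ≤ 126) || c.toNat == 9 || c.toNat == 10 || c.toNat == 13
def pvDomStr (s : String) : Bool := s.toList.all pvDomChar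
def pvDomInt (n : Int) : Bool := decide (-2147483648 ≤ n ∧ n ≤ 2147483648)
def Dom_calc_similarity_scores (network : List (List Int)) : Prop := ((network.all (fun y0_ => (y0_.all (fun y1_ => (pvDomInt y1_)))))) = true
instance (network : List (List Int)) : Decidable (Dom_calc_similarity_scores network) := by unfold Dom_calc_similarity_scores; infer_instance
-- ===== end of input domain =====

-- B replaces A's per-entry membership scans by a per-row counter and per-row ordered
-- dedup built once, so each matrix entry is a sum of counter lookups (objective: faster).

-- ===== PORT A =====
def num_in_common_between_lists (list1 list2 : List Int) : Int :=
  list1.foldl (fun count number => if number ∈ list2 then count + 1 else count) 0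

def init_matrix (n : Int) : List (List Int) :=
  (PySem.List.pyRange 0 n 1).foldl (fun matrix _row => matrix ++ [([] : List Int)]) []

-- similarity_matrix[i].append(x): i is drawn from range(n) with n = len(similarity_matrix),
-- so List.modify i.toNat is exact for Python's in-place append at index i.
def calc_similarity_scores (network : List (List Int)) : List (List Int) :=
  let n : Int := network.length
  (PySem.List.pyRange 0 n 1).foldl (fun sm i =>
    (PySem.List.pyRange 0 n 1).foldl (fun sm j =>
      let x := num_in_common_between_lists (PySem.List.pyGetD network i [])
                 (PySem.List.pyGetD network j [])
      sm.modify i.toNat (fun r => r ++ [x])) sm) (init_matrix n)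

-- ===== PORT B =====
-- list(dict.fromkeys(row)) is PySem.List.dedup; sum(... for x in ds) is map-then-sum.
def calc_similarity_scores_alt (network : List (List Int)) : List (List Int) :=
  let distincts := network.map (fun row => PySem.List.dedup row)
  network.foldl (fun matrix row =>
    let cnt := row.foldl (fun d x => d.insert x (d.getD x 0 + 1))
      (PySem.Dict.empty : PySem.Dict Int Int)
    matrix ++ [distincts.map (fun ds => (ds.map (fun x => cnt.getD x 0)).sum)]) []

-- ===== PRECONDITION & SPEC =====
def Spec_calc_similarity_scores (network : List (List Int)) (out : List (List Int)) : Prop := out = calc_similarity_scores_alt network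
instance (network : List (List Int)) (out : List (List Int)) : Decidable (Spec_calc_similarity_scores network out) := by unfold Spec_calc_similarity_scores; infer_instance

-- ===== CLAIM (what is proved, stated in full; the proofs are below) =====
def Claim_equal_calc_similarity_scores : Prop := ∀ (network : List (List Int)), Dom_calc_similarity_scores network → Spec_calc_similarity_scores network (calc_similarity_scores network)

-- ===== LEMMAS AND PROOFS =====

-- the common normal form both ports are reduced to
def pvRow (network : List (List Int)) (ri : List Int) : List Int :=
  network.map (fun rj => num_in_common_between_lists ri rj)

def pvMatrix (network : List (List Int)) : List (List Int) :=
  network.map (fun ri => pvRow network ri)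

lemma nic_eq_countP (l1 l2 : List Int) :
    num_in_common_between_lists l1 l2 = (l1.countP (fun a => decide (a ∈ l2)) : Int) := by
  unfold num_in_common_between_lists
  rw [PySem.List.foldl_ite_add_one (fun number => number ∈ l2) l1 0]
  simp

lemma sum_ite_mem (a : Int) (S : List Int) (hS : S.Nodup) :
    (S.map (fun x => if a = x then (1:Int) else 0)).sum = if a ∈ S then 1 else 0 := by
  induction S with
  | nil => simp
  | cons b S ih =>
    simp only [List.map_cons, List.sum_cons, List.mem_cons]
    rcases List.nodup_cons.mp hS with ⟨hb, hS'⟩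
    by_cases hab : a = b
    · subst hab
      simp [ih hS', hb]
    · simp [hab, ih hS']

lemma sum_dedup_count (l1 l2 : List Int) :
    ((PySem.List.dedup l2).map (fun x => (l1.count x : Int))).sum
      = (l1.countP (fun a => decide (a ∈ l2)) : Int) := by
  induction l1 with
  | nil => simp
  | cons a t ih =>
    have hcount : ∀ x : Int, (((a :: t).count x : Nat) : Int)
        = ((t.count x : Nat) : Int) + (if a = x then (1:Int) else 0) := by
      intro x
      rw [List.count_cons]
      push_cast
      simp [beq_iff_eq]
    simp only [hcount]
    rw [PySem.List.sum_map_add_int, ih,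
      sum_ite_mem a (PySem.List.dedup l2) (PySem.List.nodup_dedup l2),
      List.countP_cons]
    push_cast
    by_cases h : a ∈ l2 <;> simp [h]

lemma alt_eq (network : List (List Int)) :
    calc_similarity_scores_alt network = pvMatrix network := by
  simp only [calc_similarity_scores_alt]
  rw [PySem.List.foldl_append_singleton_eq_map]
  simp only [List.nil_append, PySem.Dict.foldl_insert_getD_add_one_eq_counter, List.map_map]
  unfold pvMatrix
  apply List.map_congr_left
  intro row _
  unfold pvRow
  apply List.map_congr_left
  intro rj _
  simp only [Function.comp_apply, PySem.Dict.getD_counter]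
  rw [sum_dedup_count, nic_eq_countP]

lemma init_eq (n : Nat) : init_matrix (n : Int) = List.replicate n [] := by
  unfold init_matrix
  rw [PySem.List.foldl_append_singleton_eq_map (fun _ => ([] : List Int))]
  simp [List.map_const', PySem.List.length_pyRange_one]

lemma modify_comp {α : Type} (sm : List α) (k : Nat) (g h : α → α) :
    (sm.modify k g).modify k h = sm.modify k (fun r => h (g r)) := by
  apply List.ext_getElem
  · simp [List.length_modify]
  · intro j h1 h2
    simp only [List.getElem_modify]
    split_ifs <;> rfl

lemma modify_append_nil {α : Type} (sm : List (List α)) (k : Nat) :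
    sm.modify k (fun r => r ++ []) = sm := by
  apply List.ext_getElem
  · simp [List.length_modify]
  · intro j h1 h2
    simp [List.getElem_modify]

lemma foldl_modify_append {β : Type} (f : β → Int) (js : List β) (k : Nat) :
    ∀ sm : List (List Int),
      js.foldl (fun sm j => sm.modify k (fun r => r ++ [f j])) sm
        = sm.modify k (fun r => r ++ js.map f) := by
  induction js with
  | nil => intro sm; simp only [List.foldl_nil, List.map_nil]; exact (modify_append_nil sm k).symm
  | cons j js ih =>
    intro sm
    simp only [List.foldl_cons, List.map_cons]
    rw [ih, modify_comp]
    simp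

lemma outer_inv (net : List (List Int)) (g : Nat → List Int) :
    ∀ m : Nat, m ≤ net.length →
      (List.range m).foldl (fun sm k => sm.modify k (fun r => r ++ g k))
          (List.replicate net.length [])
        = (List.range net.length).map (fun k => if k < m then g k else []) := by
  intro m
  induction m with
  | zero => intro _; simp [List.map_const']
  | succ m ih =>
    intro hm
    rw [List.range_succ, List.foldl_append, ih (by omega)]
    simp only [List.foldl_cons, List.foldl_nil]
    apply List.ext_getElem
    · simp [List.length_modify]
    · intro j h1 h2
      simp only [List.length_map, List.length_range] at h1 h2 ⊢
      rw [List.getElem_modify]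
      simp only [List.getElem_map, List.getElem_range]
      rcases lt_trichotomy j m with h | h | h
      · simp [h, Nat.lt_succ_of_lt h, Nat.ne_of_gt h]
      · subst h; simp
      · simp [Nat.not_lt.mpr (Nat.le_of_lt h), Nat.ne_of_lt h,
          Nat.not_lt.mpr (Nat.succ_le_of_lt h)]

lemma row_eq (network : List (List Int)) (i : Int) :
    (PySem.List.pyRange 0 (network.length : Int) 1).map
        (fun j => num_in_common_between_lists (PySem.List.pyGetD network i [])
          (PySem.List.pyGetD network j []))
      = pvRow network (PySem.List.pyGetD network i []) := by
  have h0 : (PySem.List.pyRange 0 (network.length : Int) 1).map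
      (fun j => PySem.List.pyGetD network j []) = network := by
    apply List.ext_getElem
    · simp [PySem.List.pyRange_one]
    · intro j h1 h2
      simp only [PySem.List.pyRange_one, List.map_map, List.getElem_map,
        List.getElem_range, Function.comp_apply, zero_add, sub_zero,
        Int.toNat_natCast, PySem.List.pyGetD_natCast]
      exact List.getD_eq_getElem _ _ h2
  calc (PySem.List.pyRange 0 (network.length : Int) 1).map
        (fun j => num_in_common_between_lists (PySem.List.pyGetD network i [])
          (PySem.List.pyGetD network j []))
      = ((PySem.List.pyRange 0 (network.length : Int) 1).map
          (fun j => PySem.List.pyGetD network j [])).map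
            (fun rj => num_in_common_between_lists (PySem.List.pyGetD network i []) rj) := by
        rw [List.map_map]; rfl
    _ = pvRow network (PySem.List.pyGetD network i []) := by rw [h0]; rfl

lemma a_eq (network : List (List Int)) :
    calc_similarity_scores network = pvMatrix network := by
  simp only [calc_similarity_scores]
  rw [init_eq network.length]
  have hstep : (fun (sm : List (List Int)) (i : Int) =>
      (PySem.List.pyRange 0 (network.length : Int) 1).foldl (fun sm j =>
        sm.modify i.toNat (fun r => r ++ [num_in_common_between_lists
          (PySem.List.pyGetD network i []) (PySem.List.pyGetD network j [])])) sm)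
      = (fun (sm : List (List Int)) (i : Int) => sm.modify i.toNat
          (fun r => r ++ pvRow network (PySem.List.pyGetD network i []))) := by
    funext sm i
    rw [foldl_modify_append
      (fun j => num_in_common_between_lists (PySem.List.pyGetD network i [])
        (PySem.List.pyGetD network j [])), row_eq]
  rw [hstep, PySem.List.pyRange_one]
  simp only [sub_zero, Int.toNat_natCast, zero_add, List.foldl_map,
    PySem.List.pyGetD_natCast]
  rw [outer_inv network (fun k => pvRow network (network.getD k [])) network.length le_rfl]
  apply List.ext_getElem
  · simp [pvMatrix]
  · intro j h1 h2
    simp only [List.length_map, List.length_range] at h1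
    simp only [pvMatrix, List.getElem_map, List.getElem_range, h1, if_true,
      List.getD_eq_getElem]

-- ===== VERDICT (by name: the statement is the Claim_ definition above) =====
theorem calc_similarity_scores_spec : Claim_equal_calc_similarity_scores := by
  intro network _
  unfold Spec_calc_similarity_scores
  rw [a_eq, alt_eq]
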